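-- pv_equiv track=rewrite | github.com/dankodak/Statistik | Dichte3.py | Dichte3
-- ===== SOURCE A (Python) =====
-- def Dichte3(indikator, kugelnum):
--     #Initialisierung des Dict
--     m_rho = {}
--     #Schleife ueber alle Kugelnummern
--     for i in range(0,len(kugelnum)):
--         #Wenn Anzahl der Datenpunkte in einer Kugel noch nicht als Schluessel existiert, fuege ihn hinzu
--         #und speichere Datenpunkt ab
--         if len(indikator[kugelnum[i]]) not in m_rho:
--             m_rho[len(indikator[kugelnum[i]])] = [i]
--         #Ansonsten speichere einfach ab
--         else:
--             m_rho[len(indikator[kugelnum[i]])] = m_rho[len(indikator[kugelnum[i]])] + [i]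
--
--     return m_rho
-- ===== SOURCE B (Python) =====
-- def Dichte3(indikator, kugelnum):
--     # Different decomposition: compute the key list once, dedup keys in first-appearance
--     # order, then build each bucket by filtering the enumerated key list.
--     keys = [len(indikator[k]) for k in kugelnum]
--     order = []
--     for k in keys:
--         if k not in order:
--             order.append(k)
--     return {k: [i for i, kk in enumerate(keys) if kk == k] for k in order}
-- ===== Notes on version B (the rewrite author's own statement) =====
-- stated objective: alternative
-- what changed: A builds the dict in a single pass, appending each index to the bucket under its key as it goes; B computes the key list once, dedups the keys in first-appearance order, then builds each bucket by filtering the enumerated key list per distinct key.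
import Mathlib
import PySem

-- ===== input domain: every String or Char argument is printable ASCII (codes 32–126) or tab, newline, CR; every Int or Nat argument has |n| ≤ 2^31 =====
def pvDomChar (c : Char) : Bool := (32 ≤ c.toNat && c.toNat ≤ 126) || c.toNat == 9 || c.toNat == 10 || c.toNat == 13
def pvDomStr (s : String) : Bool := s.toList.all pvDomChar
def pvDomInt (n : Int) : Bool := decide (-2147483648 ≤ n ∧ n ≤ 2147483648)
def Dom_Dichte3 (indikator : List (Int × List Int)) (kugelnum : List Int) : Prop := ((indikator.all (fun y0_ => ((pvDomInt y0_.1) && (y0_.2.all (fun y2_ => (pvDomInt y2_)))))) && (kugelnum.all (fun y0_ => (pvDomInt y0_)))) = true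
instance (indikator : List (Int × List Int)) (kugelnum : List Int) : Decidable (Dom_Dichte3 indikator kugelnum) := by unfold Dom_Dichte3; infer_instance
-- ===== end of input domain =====

-- B replaces A's single-pass dict accumulation by: key list once, ordered dedup of the
-- keys, then one filtered enumeration per distinct key (objective: alternative decomposition).

-- ===== PORT A =====
-- literal port of A's loop; kugelnum[i] is always in range (i from range(len)), so pyGetD
-- is exact; indikator[·] (KeyError on a missing key) is excluded by Pre_Dichte3, getD [] there.
def Dichte3 (indikator : List (Int × List Int)) (kugelnum : List Int) : List (Int × List Int) :=
  ((PySem.List.pyRange 0 (kugelnum.length : Int) 1).foldl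
    (fun m_rho i =>
      let key : Int := ((PySem.Dict.mk indikator).getD (PySem.List.pyGetD kugelnum i 0) []).length
      if m_rho.contains key = false then
        m_rho.insert key [i]
      else
        m_rho.insert key (m_rho.getD key [] ++ [i]))
    PySem.Dict.empty).items

-- ===== PORT B =====
def Dichte3_alt (indikator : List (Int × List Int)) (kugelnum : List Int) : List (Int × List Int) :=
  let keys : List Int := kugelnum.map (fun k => ((PySem.Dict.mk indikator).getD k []).length)
  let order : List Int := keys.foldl (fun acc k => if acc.contains k then acc else acc ++ [k]) []
  order.map (fun k => (k, ((PySem.List.enumerate keys 0).filter (fun p => p.2 == k)).map (·.1)))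

-- ===== PRECONDITION & SPEC =====
-- Pre_ excludes exactly the inputs where Python A raises KeyError: some element of
-- kugelnum is not a key of indikator.
def Pre_Dichte3 (indikator : List (Int × List Int)) (kugelnum : List Int) : Prop :=
  ∀ k ∈ kugelnum, k ∈ indikator.map Prod.fst
instance (indikator : List (Int × List Int)) (kugelnum : List Int) : Decidable (Pre_Dichte3 indikator kugelnum) := by unfold Pre_Dichte3; infer_instance
def pvWitness_Dichte3 : (List (Int × List Int)) × List Int := ([(0, [1, 2]), (3, [])], [0, 3, 0])

def Spec_Dichte3 (indikator : List (Int × List Int)) (kugelnum : List Int) (out : List (Int × List Int)) : Prop := out = Dichte3_alt indikator kugelnum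
instance (indikator : List (Int × List Int)) (kugelnum : List Int) (out : List (Int × List Int)) : Decidable (Spec_Dichte3 indikator kugelnum out) := by unfold Spec_Dichte3; infer_instance

-- ===== CLAIM (what is proved, stated in full; the proofs are below) =====
def Claim_equal_Dichte3 : Prop := ∀ (indikator : List (Int × List Int)) (kugelnum : List Int), Dom_Dichte3 indikator kugelnum → Pre_Dichte3 indikator kugelnum → Spec_Dichte3 indikator kugelnum (Dichte3 indikator kugelnum)

-- ===== LEMMAS AND PROOFS =====

theorem pv_enumerate_map {α β : Type} (f : α → β) (xs : List α) (s : Int) :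
    PySem.List.enumerate (xs.map f) s = (PySem.List.enumerate xs s).map (fun p => (p.1, f p.2)) := by
  induction xs generalizing s with
  | nil => simp [PySem.List.enumerate_nil]
  | cons x t ih => simp [PySem.List.enumerate_cons, ih]

theorem pv_modify_eq_insert (d : PySem.Dict Int (List Int)) (k : Int) (f : List Int → List Int) :
    d.modify k [] f = d.insert k (f (d.getD k [])) := by
  simp [PySem.Dict.modify, PySem.Dict.insert, PySem.Dict.getD, PySem.Dict.get?]

theorem Dichte3_eq (indikator : List (Int × List Int)) (kugelnum : List Int) :
    Dichte3 indikator kugelnum = Dichte3_alt indikator kugelnum := by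
  unfold Dichte3 Dichte3_alt
  set keyf : Int → Int := fun x => (((PySem.Dict.mk indikator).getD x []).length : Int) with hkeyf
  set E : List (Int × Int) := PySem.List.enumerate kugelnum 0 with hE
  set L : List (Int × Int) := E.map (fun p => (keyf p.2, p.1)) with hL
  -- the dict built by A's loop, as a modify-fold over the (key, index) pairs
  have h1 : (PySem.List.pyRange 0 (kugelnum.length : Int) 1).foldl
      (fun m_rho i =>
        let key : Int := ((PySem.Dict.mk indikator).getD (PySem.List.pyGetD kugelnum i 0) []).length
        if m_rho.contains key = false then m_rho.insert key [i]
        else m_rho.insert key (m_rho.getD key [] ++ [i]))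
      PySem.Dict.empty
      = L.foldl (fun d q => d.modify q.1 [] (· ++ [q.2])) PySem.Dict.empty := by
    rw [hL, List.foldl_map, hE, PySem.List.enumerate_eq_map_pyRange kugelnum 0, List.foldl_map]
    have hlen : PySem.List.len kugelnum = (kugelnum.length : Int) := by
      simp [PySem.List.len_eq]
    rw [hlen]
    apply PySem.List.foldl_congr_mem
    intro d i _
    simp only [hkeyf]
    by_cases hc : d.contains (((PySem.Dict.mk indikator).getD (PySem.List.pyGetD kugelnum i 0) []).length : Int) = false
    · simp [hc, pv_modify_eq_insert, PySem.Dict.getD_of_not_contains _ _ hc]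
    · simp [hc, pv_modify_eq_insert]
  rw [h1]
  have hnodup : (L.foldl (fun d q => d.modify q.1 [] (· ++ [q.2])) PySem.Dict.empty).keys.Nodup := by
    exact PySem.Dict.nodup_keys_foldl_modify_key L Prod.fst [] (fun d q => (· ++ [q.2])) PySem.Dict.empty (by simp)
  have hkeys : (L.foldl (fun d q => d.modify q.1 [] (· ++ [q.2])) PySem.Dict.empty).keys
      = PySem.Set.ofList (kugelnum.map keyf) := by
    rw [PySem.Dict.keys_foldl_modify_key L Prod.fst [] (fun d q => (· ++ [q.2]))]
    rw [PySem.Dict.keys_empty, PySem.Set.update_nil_left]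
    congr 1
    rw [hL, List.map_map]
    calc (E.map (Prod.fst ∘ fun p : Int × Int => (keyf p.2, p.1)))
        = (E.map (fun p => p.2)).map keyf := by
          rw [List.map_map]; simp [Function.comp_def]
      _ = kugelnum.map keyf := by rw [hE, PySem.List.map_snd_enumerate]
  have hgetD : ∀ k : Int, (L.foldl (fun d q => d.modify q.1 [] (· ++ [q.2])) PySem.Dict.empty).getD k []
      = (L.filter (fun q => q.1 == k)).map (·.2) := by
    intro k
    rw [PySem.Dict.getD_foldl_modify_append L PySem.Dict.empty k, PySem.Dict.getD_empty]
    simp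
  -- the ordered dedup loop of B is Set.ofList
  have horder : (kugelnum.map keyf).foldl (fun acc k => if acc.contains k then acc else acc ++ [k]) []
      = PySem.Set.ofList (kugelnum.map keyf) := by
    rw [PySem.Set.ofList_eq_foldl]
    apply PySem.List.foldl_congr_mem
    intro acc x _
    simp [PySem.Set.add]
  simp only []
  rw [PySem.Dict.items_eq_map_keys _ hnodup [], hkeys, horder]
  apply List.map_congr_left
  intro k _
  rw [hgetD k]
  rw [pv_enumerate_map keyf kugelnum 0, ← hE, hL]
  simp [List.filter_map, List.map_map, Function.comp_def]
-- ===== VERDICT (by name: the statement is the Claim_ definition above) =====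
theorem Dichte3_spec : Claim_equal_Dichte3 := by
  intro indikator kugelnum _ _
  unfold Spec_Dichte3
  exact Dichte3_eq indikator kugelnum
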